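-- pv_equiv track=rewrite | github.com/ayukyo/alltoolkit | Python/gray_code_utils/mod.py | generate_2d_gray
-- ===== SOURCE A (Python) =====
-- from typing import List, Tuple, Generator, Optional
--
-- def generate_gray_codes(n: int) -> List[int]:
--     """生成n位Gray码序列
--
--     使用递归方法生成所有n位Gray码
--
--     Args:
--         n: 位数
--
--     Returns:
--         Gray码值列表（十进制表示）
--
--     Examples:
--         >>> generate_gray_codes(2)
--         [0, 1, 3, 2]
--         >>> generate_gray_codes(3)
--         [0, 1, 3, 2, 6, 7, 5, 4]
--     """
--     if n <= 0:
--         return [0]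
--
--     if n == 1:
--         return [0, 1]
--
--     # 递归生成n-1位Gray码
--     prev = generate_gray_codes(n - 1)
--
--     # 前半部分：原序列
--     # 后半部分：原序列反转后加前缀1
--     result = prev.copy()
--     for code in reversed(prev):
--         result.append((1 << (n - 1)) | code)
--
--     return result
--
-- def generate_2d_gray(width: int, height: int) -> List[Tuple[int, int]]:
--     """生成2D Gray码遍历路径
--
--     用于图像扫描、网格遍历等
--
--     Args:
--         width: 宽度（需要是2的幂）
--         height: 高度（需要是2的幂）
--
--     Returns:
--         (x, y) 坐标元组列表
--     """
--     if width <= 0 or height <= 0: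
--         return []
--
--     # 确定需要的位数
--     width_bits = (width - 1).bit_length()
--     height_bits = (height - 1).bit_length()
--
--     total_codes = max(width, height)
--     if total_codes & (total_codes - 1) != 0:
--         # 不是2的幂，使用更大的2的幂
--         total_codes = 1 << (total_codes - 1).bit_length()
--
--     gray_codes = generate_gray_codes(width_bits + height_bits)
--
--     result = []
--     for code in gray_codes:
--         # 低width_bits位作为x，高height_bits位作为y
--         x = code & ((1 << width_bits) - 1)
--         y = code >> width_bits
--         if x < width and y < height:
--             result.append((x, y))
--
--     return result
-- ===== SOURCE B (Python) =====
-- def generate_2d_gray(width, height):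
--     """Same result as the recursive version, via the closed-form Gray code i ^ (i >> 1)."""
--     if width <= 0 or height <= 0:
--         return []
--     width_bits = (width - 1).bit_length()
--     height_bits = (height - 1).bit_length()
--     mask = (1 << width_bits) - 1
--     result = []
--     for i in range(1 << (width_bits + height_bits)):
--         code = i ^ (i >> 1)
--         x = code & mask
--         y = code >> width_bits
--         if x < width and y < height:
--             result.append((x, y))
--     return result
-- ===== Notes on version B (the rewrite author's own statement) =====
-- stated objective: simpler
-- what changed: Replaces the recursive reflect-and-prefix generate_gray_codes (plus the dead total_codes block) by a single loop that computes each Gray code directly with the closed form i ^ (i >> 1).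
import Mathlib
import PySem

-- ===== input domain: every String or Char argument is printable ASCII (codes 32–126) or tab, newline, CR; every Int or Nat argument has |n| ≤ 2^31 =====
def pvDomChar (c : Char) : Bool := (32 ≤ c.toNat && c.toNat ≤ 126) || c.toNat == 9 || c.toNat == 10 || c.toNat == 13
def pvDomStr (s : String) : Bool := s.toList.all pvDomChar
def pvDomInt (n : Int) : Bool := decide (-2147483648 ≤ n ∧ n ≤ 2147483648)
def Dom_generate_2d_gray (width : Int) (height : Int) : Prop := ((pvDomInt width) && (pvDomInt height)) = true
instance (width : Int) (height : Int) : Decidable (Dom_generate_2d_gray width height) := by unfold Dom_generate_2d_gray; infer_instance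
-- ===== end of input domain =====

-- B replaces the recursive reflect-and-prefix Gray-code generation (and A's dead
-- total_codes block) by the closed form code = i ^ (i >> 1) computed in one loop.

-- ===== PORT A =====
-- helper: Python generate_gray_codes (recursive reflect-and-prefix construction)
def generate_gray_codes (n : Int) : List Int :=
  if n ≤ 0 then [0]
  else if n = 1 then [0, 1]
  else
    let prev := generate_gray_codes (n - 1)
    prev ++ prev.reverse.map (fun code => PySem.Int.bor ((1 : Int) <<< (n - 1).toNat) code)
termination_by n.toNat
decreasing_by omega

def generate_2d_gray (width : Int) (height : Int) : List (Int × Int) :=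
  if width ≤ 0 ∨ height ≤ 0 then []
  else
    let width_bits : Nat := PySem.Int.bitLength (width - 1)
    let height_bits : Nat := PySem.Int.bitLength (height - 1)
    let total_codes : Int := max width height
    let _total_codes : Int :=  -- Python reassigns total_codes; the value is never used afterwards
      if PySem.Int.band total_codes (total_codes - 1) ≠ 0 then
        (1 : Int) <<< PySem.Int.bitLength (total_codes - 1)
      else total_codes
    let gray_codes := generate_gray_codes ((width_bits : Int) + (height_bits : Int))
    gray_codes.foldl (fun result code =>
      let x := PySem.Int.band code ((1 : Int) <<< width_bits - 1)
      let y := code >>> width_bits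
      if x < width ∧ y < height then result ++ [(x, y)] else result) []

-- ===== PORT B =====
def generate_2d_gray_alt (width : Int) (height : Int) : List (Int × Int) :=
  if width ≤ 0 ∨ height ≤ 0 then []
  else
    let width_bits : Nat := PySem.Int.bitLength (width - 1)
    let height_bits : Nat := PySem.Int.bitLength (height - 1)
    let mask : Int := (1 : Int) <<< width_bits - 1
    (PySem.List.pyRange 0 ((1 : Int) <<< (width_bits + height_bits)) 1).foldl (fun result i =>
      let code := PySem.Int.bxor i (i >>> (1 : Nat))
      let x := PySem.Int.band code mask
      let y := code >>> width_bits
      if x < width ∧ y < height then result ++ [(x, y)] else result) []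

-- ===== PRECONDITION & SPEC =====
def Spec_generate_2d_gray (width : Int) (height : Int) (out : List (Int × Int)) : Prop := out = generate_2d_gray_alt width height
instance (width : Int) (height : Int) (out : List (Int × Int)) : Decidable (Spec_generate_2d_gray width height out) := by unfold Spec_generate_2d_gray; infer_instance

-- ===== CLAIM (what is proved, stated in full; the proofs are below) =====
def Claim_equal_generate_2d_gray : Prop := ∀ (width : Int) (height : Int), Dom_generate_2d_gray width height → Spec_generate_2d_gray width height (generate_2d_gray width height)

-- ===== LEMMAS AND PROOFS =====

-- 2^s - 1 - k is the bitwise complement of k below bit s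
theorem pv_tb_sub : ∀ (s : Nat), ∀ k, k < 2^s → 2^s - 1 - k = (2^s - 1) ^^^ k := by
  intro s
  induction s with
  | zero => intro k hk; interval_cases k; decide
  | succ s ih =>
    intro k hk
    have hq : k / 2 < 2 ^ s := by omega
    have h1 : 2 ^ (s+1) - 1 = Nat.bit true (2^s - 1) := by
      simp [Nat.bit]; have := Nat.one_le_two_pow (n := s); ring_nf; omega
    have h2 : k = Nat.bit (k % 2 = 1) (k / 2) := by
      rcases Nat.mod_two_eq_zero_or_one k with h | h <;> simp [Nat.bit, h] <;> omega
    rw [h1, h2, Nat.xor_bit, ← ih _ hq]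
    rcases Nat.mod_two_eq_zero_or_one k with h | h <;>
      simp [Nat.bit, h] <;> omega

-- reflection identity of the binary-reflected Gray code
theorem pv_gray_reflect (s k : Nat) (hk : k < 2^s) :
    (2^s + k) ^^^ ((2^s + k)/2) = 2^s ||| ((2^s - 1 - k) ^^^ ((2^s - 1 - k)/2)) := by
  have hkb : ∀ j, s ≤ j → k.testBit j = false := fun j hj =>
    Nat.testBit_lt_two_pow (lt_of_lt_of_le hk (Nat.pow_le_pow_right (by norm_num) hj))
  have htb : ∀ i, (2^s + k).testBit i = (decide (i = s) || k.testBit i) := by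
    intro i
    rcases lt_trichotomy i s with h | h | h
    · simp [Nat.testBit_two_pow_add_gt h, Nat.ne_of_lt h]
    · subst h; simp [Nat.testBit_two_pow_add_eq, hkb i le_rfl]
    · have hlt : 2^s + k < 2^i := by
        calc 2^s + k < 2^(s+1) := by omega
        _ ≤ 2^i := Nat.pow_le_pow_right (by norm_num) h
      simp [Nat.testBit_lt_two_pow hlt, hkb i (Nat.le_of_lt h), Nat.ne_of_lt' h]
  apply Nat.eq_of_testBit_eq
  intro i
  simp only [Nat.testBit_xor, Nat.testBit_lor, Nat.testBit_div_two, htb,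
    pv_tb_sub s k hk, Nat.testBit_two_pow, Nat.testBit_two_pow_sub_one]
  rcases lt_trichotomy (i+1) s with h | h | h
  · simp [Nat.ne_of_lt (by omega : i < s), Nat.ne_of_lt h, h, (by omega : i < s)]
    intro h'; omega
  · simp [h, (by omega : i < s), Nat.ne_of_lt (by omega : i < s), hkb s le_rfl]
    intro h'; omega
  · by_cases hi : i = s
    · simp [hi, hkb s le_rfl]
      exact hkb (s+1) (by omega)
    · simp only [hkb i (by omega), hkb (i+1) (by omega)]
      simp only [decide_eq_false (by omega : ¬ (i + 1 = s)), decide_eq_false (by omega : ¬ (s = i)),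
        decide_eq_false (by omega : ¬ (i < s)), decide_eq_false (by omega : ¬ (i + 1 < s)),
        decide_eq_false (by omega : ¬ (i = s))]
      rfl

theorem pv_rev_range (n : Nat) :
    (List.range n).reverse = (List.range n).map (fun k => n - 1 - k) := by
  apply List.ext_getElem
  · simp
  · intro i h1 h2
    simp [List.getElem_reverse]

-- A's recursive Gray list is the closed-form map k ↦ k xor (k/2) over range (2^n)
theorem pv_gray_eq : ∀ (n : Nat),
    generate_gray_codes (n : Int) = (List.range (2^n)).map (fun k => ((k ^^^ k/2 : Nat) : Int)) := by
  intro n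
  induction n using Nat.strong_induction_on with
  | _ n ih =>
    match n with
    | 0 =>
      rw [generate_gray_codes]
      norm_num
    | 1 =>
      rw [generate_gray_codes]
      norm_num [List.range_succ]
    | (m+2) =>
      rw [generate_gray_codes]
      have e0 : ¬ (((m+2 : Nat) : Int) ≤ 0) := by push_cast; omega
      have e1 : ¬ (((m+2 : Nat) : Int) = 1) := by push_cast; omega
      rw [if_neg e0, if_neg e1]
      have e2 : ((m+2 : Nat) : Int) - 1 = ((m+1 : Nat) : Int) := by push_cast; ring
      rw [e2, Int.toNat_natCast, ih (m+1) (by omega)]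
      have hsplit : 2^(m+2) = 2^(m+1) + 2^(m+1) := by ring
      simp only [hsplit, List.range_add, List.map_append, List.map_reverse, List.map_map]
      congr 1
      rw [← List.map_reverse, pv_rev_range, List.map_map]
      apply List.map_congr_left
      intro x hx
      have hxlt : x < 2^(m+1) := List.mem_range.mp hx
      simp only [Function.comp]
      rw [show (1 : Int) <<< (m+1) = ((2^(m+1) : Nat) : Int) by
            rw [← Nat.one_shiftLeft, Int.natCast_shiftLeft]; norm_num,
          PySem.Int.bor_natCast, pv_gray_reflect (m+1) x hxlt]

-- bridge B's per-index Gray code (on Int) to the Nat closed form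
theorem pv_code_cast (k : Nat) :
    PySem.Int.bxor (k : Int) ((k : Int) >>> (1 : Nat)) = ((k ^^^ k/2 : Nat) : Int) := by
  rw [← Int.natCast_shiftRight, PySem.Int.bxor_natCast, Nat.shiftRight_one]

-- the two ports agree on every input
theorem pv_main (width height : Int) :
    generate_2d_gray width height = generate_2d_gray_alt width height := by
  by_cases hg : width ≤ 0 ∨ height ≤ 0
  · simp [generate_2d_gray, generate_2d_gray_alt, hg]
  · simp only [generate_2d_gray, generate_2d_gray_alt, if_neg hg]
    set wb : Nat := PySem.Int.bitLength (width - 1) with hwb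
    set hb : Nat := PySem.Int.bitLength (height - 1) with hhb
    have hcast : (wb : Int) + (hb : Int) = ((wb + hb : Nat) : Int) := by push_cast; ring
    have hlist : generate_gray_codes ((wb : Int) + (hb : Int))
        = (PySem.List.pyRange 0 ((1 : Int) <<< (wb + hb)) 1).map
            (fun i => PySem.Int.bxor i (i >>> (1 : Nat))) := by
      have hN : (((1 : Int) <<< (wb + hb)) - 0).toNat = 2^(wb + hb) := by
        rw [show (1 : Int) <<< (wb + hb) = ((2^(wb + hb) : Nat) : Int) by
              rw [← Nat.one_shiftLeft, Int.natCast_shiftLeft]; norm_num]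
        rw [sub_zero, Int.toNat_natCast]
      rw [hcast, pv_gray_eq (wb + hb), PySem.List.pyRange_one, hN, List.map_map]
      apply List.map_congr_left
      intro k _
      simp only [Function.comp, zero_add]
      exact (pv_code_cast k).symm
    rw [hlist, List.foldl_map]

-- ===== VERDICT (by name: the statement is the Claim_ definition above) =====
theorem generate_2d_gray_spec : Claim_equal_generate_2d_gray := by
  intro width height _
  unfold Spec_generate_2d_gray
  exact pv_main width height
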